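-- pv_equiv track=rewrite | github.com/Durgaprasad-kakarla/Geeks-for-Geeks | Hard/Minimum Points To Reach Destination/minimum-points-to-reach-destination.py | minPoints
-- ===== SOURCE A (Python) =====
-- def minPoints(m, n, points):
-- 	# code here
-- 	dp=[[float('inf') for i in range(n+1)] for j in range(m+1)]
-- 	dp[m-1][n]=1
-- 	dp[m][n-1]=1
-- 	for i in range(m-1,-1,-1):
-- 	    for j in range(n-1,-1,-1):
-- 	        dp[i][j]=max(1,min(dp[i+1][j],dp[i][j+1])-points[i][j])
-- 	return dp[0][0]
-- ===== SOURCE B (Python) =====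
-- def minPoints(m, n, points):
--     # Top-down memoized recursion: need(i, j) = minimum points required when
--     # entering cell (i, j); positions off the bottom/right edge are unreachable
--     # (None) except the two exit sentinels adjacent to the destination, which
--     # need 1. No DP table is built; only visited cells are memoized.
--     memo = {}
--
--     def need(i, j):
--         if j == n and i == m - 1:
--             return 1
--         if i == m and j == n - 1:
--             return 1
--         if i >= m or j >= n:
--             return None
--         if (i, j) not in memo:
--             down = need(i + 1, j)
--             right = need(i, j + 1)
--             if down is None:
--                 best = right
--             elif right is None:
--                 best = down
--             else:
--                 best = min(down, right)
--             v = best - points[i][j]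
--             memo[(i, j)] = v if v > 1 else 1
--         return memo[(i, j)]
--
--     return need(0, 0)
-- ===== Notes on version B (the rewrite author's own statement) =====
-- stated objective: alternative
-- what changed: Replaces A's bottom-up (m+1)x(n+1) float('inf')-padded table, filled by two nested index loops, with top-down memoized recursion need(i,j) from the start cell, with off-grid positions unreachable except the two unit exit sentinels by the destination.
-- outside the precondition, e.g. on minPoints(0, 0, []): A returns 1, B returns None; on minPoints(0, 2, []): A returns inf, B returns None; on minPoints(3, 0, [[1], [2], [3]]): A returns inf, B returns None
import Mathlib
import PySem

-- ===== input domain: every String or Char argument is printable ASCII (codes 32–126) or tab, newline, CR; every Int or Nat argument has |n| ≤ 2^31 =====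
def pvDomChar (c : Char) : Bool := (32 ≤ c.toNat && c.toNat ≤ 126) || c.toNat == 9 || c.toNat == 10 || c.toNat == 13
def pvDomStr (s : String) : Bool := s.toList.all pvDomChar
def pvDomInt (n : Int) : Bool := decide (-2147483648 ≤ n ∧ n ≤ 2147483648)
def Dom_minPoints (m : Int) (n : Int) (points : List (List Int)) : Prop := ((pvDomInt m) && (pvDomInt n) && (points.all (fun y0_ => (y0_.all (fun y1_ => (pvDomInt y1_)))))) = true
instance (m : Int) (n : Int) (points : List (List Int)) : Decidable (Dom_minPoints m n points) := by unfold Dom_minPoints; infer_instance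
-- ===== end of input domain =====

-- B replaces A's bottom-up (m+1)×(n+1) float('inf')-padded DP table with top-down memoized
-- recursion from the start cell (off-grid = unreachable except the two unit exit sentinels);
-- same asymptotic cost, different decomposition; neither version mutates its arguments.

-- ===== PORT A =====
-- A's dp cells live in ℝ∪{inf}; modelled as Option Int with none = float('inf').
-- oMin/oSub/oMax1 are Python's min / subtraction / max(1,·) on that domain.
def oMin (a b : Option Int) : Option Int :=
  match a, b with
  | none, b => b
  | some a, none => some a
  | some a, some b => some (min a b)

def oSub (a : Option Int) (p : Int) : Option Int := a.map (· - p)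

def oMax1 : Option Int → Option Int
  | none => none
  | some a => some (max 1 a)

-- dp[i][j] read / write (Python raises out of range: in-range under Pre_, where these are exact)
def cellGet (dp : List (List (Option Int))) (i j : Int) : Option Int :=
  PySem.List.pyGetD (PySem.List.pyGetD dp i []) j none

def cellSet (dp : List (List (Option Int))) (i j : Int) (v : Option Int) : List (List (Option Int)) :=
  PySem.List.pySetD dp i (PySem.List.pySetD (PySem.List.pyGetD dp i []) j v)

def minPoints (m : Int) (n : Int) (points : List (List Int)) : Int :=
  let dp0 := (PySem.List.pyRange 0 (m+1) 1).map
      (fun _ => (PySem.List.pyRange 0 (n+1) 1).map (fun _ => (none : Option Int)))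
  let dp1 := cellSet dp0 (m-1) n (some 1)
  let dp2 := cellSet dp1 m (n-1) (some 1)
  let dp3 := (PySem.List.pyRange (m-1) (-1) (-1)).foldl (fun dp i =>
      (PySem.List.pyRange (n-1) (-1) (-1)).foldl (fun dp j =>
        cellSet dp i j (oMax1 (oSub (oMin (cellGet dp (i+1) j) (cellGet dp i (j+1)))
          (PySem.List.pyGetD (PySem.List.pyGetD points i []) j 0)))) dp) dp2
  (cellGet dp3 0 0).getD 0   -- dp[0][0] is a finite int under Pre_; .getD 0 only coerces Option away

-- ===== PORT B =====
-- need(i, j) of Source B, branch for branch; the memo dict only caches the pure recursion, so the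
-- port is the recursion itself (none = Python's None = unreachable; the best-None case, where
-- Python's 'best - points[i][j]' would raise TypeError, is outside Pre_ and mapped to none).
def needB (m n : Int) (points : List (List Int)) (i j : Int) : Option Int :=
  if j = n ∧ i = m - 1 then some 1
  else if i = m ∧ j = n - 1 then some 1
  else if i ≥ m ∨ j ≥ n then none
  else
    let down := needB m n points (i+1) j
    let right := needB m n points i (j+1)
    let best := match down, right with
      | none, r => r
      | some d, none => some d
      | some d, some r => some (min d r)
    match best with
    | none => none
    | some b =>
        let v := b - PySem.List.pyGetD (PySem.List.pyGetD points i []) j 0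
        some (if v > 1 then v else 1)
termination_by ((m - i).toNat + (n - j).toNat)
decreasing_by all_goals omega

def minPoints_alt (m : Int) (n : Int) (points : List (List Int)) : Int :=
  (needB m n points 0 0).getD 0   -- some _ under Pre_; .getD 0 only coerces Option away

-- ===== PRECONDITION & SPEC =====
-- Pre_ excludes grids whose first m rows do not provide n entries (A raises IndexError) and
-- non-positive dimensions other than the two unit-exit corners (m,n) = (0,1), (1,0): on the
-- excluded degenerate dimensions A raises, returns float('inf') (not an int), or — at (0,0)
-- only — returns 1 through double negative-index wraparound, while B reports None there.
def Pre_minPoints (m : Int) (n : Int) (points : List (List Int)) : Prop :=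
  (1 ≤ m ∧ 1 ≤ n ∧ m ≤ (points.length : Int) ∧
    ∀ row ∈ points.take m.toNat, n ≤ (row.length : Int))
  ∨ (m = 0 ∧ n = 1) ∨ (m = 1 ∧ n = 0)
instance (m : Int) (n : Int) (points : List (List Int)) : Decidable (Pre_minPoints m n points) := by
  unfold Pre_minPoints; infer_instance

def pvWitness_minPoints : Int × Int × List (List Int) := (2, 3, [[-2, 1, -3], [3, -4, 2]])

def Spec_minPoints (m : Int) (n : Int) (points : List (List Int)) (out : Int) : Prop := out = minPoints_alt m n points
instance (m : Int) (n : Int) (points : List (List Int)) (out : Int) : Decidable (Spec_minPoints m n points out) := by unfold Spec_minPoints; infer_instance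

-- ===== CLAIM (what is proved, stated in full; the proofs are below) =====
def Claim_equal_minPoints : Prop := ∀ (m : Int) (n : Int) (points : List (List Int)), Dom_minPoints m n points → Pre_minPoints m n points → Spec_minPoints m n points (minPoints m n points)

-- ===== LEMMAS AND PROOFS =====

-- The common mathematical value of cell (i,j): none plays float('inf') / Python's None.
def pget (pts : List (List Int)) (i j : Nat) : Int := (pts.getD i []).getD j 0

def F (M N : Nat) (pts : List (List Int)) (i j : Nat) : Option Int :=
  if h : i < M ∧ j < N then
    oMax1 (oSub (oMin (F M N pts (i+1) j) (F M N pts i (j+1))) (pget pts i j))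
  else if (i+1 = M ∧ j = N) ∨ (i = M ∧ j+1 = N) then some 1 else none
termination_by (M - i) + (N - j)
decreasing_by all_goals omega

def fv (M N : Nat) (pts : List (List Int)) (i j : Nat) : Int := (F M N pts i j).getD 0

lemma F_int {M N : Nat} {pts : List (List Int)} {i j : Nat} (hi : i < M) (hj : j < N) :
    F M N pts i j = oMax1 (oSub (oMin (F M N pts (i+1) j) (F M N pts i (j+1))) (pget pts i j)) := by
  rw [F]; rw [dif_pos ⟨hi, hj⟩]

lemma F_bnd {M N : Nat} {pts : List (List Int)} {i j : Nat} (h : ¬(i < M ∧ j < N)) :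
    F M N pts i j = if (i+1 = M ∧ j = N) ∨ (i = M ∧ j+1 = N) then some 1 else none := by
  rw [F]; rw [dif_neg h]

theorem F_isSome (M N : Nat) (pts : List (List Int)) (i j : Nat) (hi : i < M) (hj : j < N) :
    (F M N pts i j).isSome := by
  rw [F_int hi hj]
  have hmin : (oMin (F M N pts (i+1) j) (F M N pts i (j+1))).isSome := by
    rcases Nat.lt_or_ge (i+1) M with h1 | h1
    · have h := F_isSome M N pts (i+1) j h1 hj
      cases hA : F M N pts (i+1) j with
      | none => rw [hA] at h; simp at h
      | some a => cases hB : F M N pts i (j+1) <;> simp [oMin]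
    · rcases Nat.lt_or_ge (j+1) N with h2 | h2
      · have h := F_isSome M N pts i (j+1) hi h2
        cases hB : F M N pts i (j+1) with
        | none => rw [hB] at h; simp at h
        | some b => cases hA : F M N pts (i+1) j <;> simp [oMin]
      · have hA : F M N pts (i+1) j = some 1 := by
          rw [F_bnd (by omega)]
          rw [if_pos (Or.inr (by omega))]
        rw [hA]; cases hB : F M N pts i (j+1) <;> simp [oMin]
  cases hmv : oMin (F M N pts (i+1) j) (F M N pts i (j+1)) with
  | none => rw [hmv] at hmin; simp at hmin
  | some v => simp [oSub, oMax1]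
termination_by (M - i) + (N - j)

theorem F_some (M N : Nat) (pts : List (List Int)) (i j : Nat) (hi : i < M) (hj : j < N) :
    F M N pts i j = some (fv M N pts i j) := by
  have h := F_isSome M N pts i j hi hj
  obtain ⟨a, ha⟩ := Option.isSome_iff_exists.mp h
  rw [fv, ha]
  rfl

-- ===== A side: the dp table contents after the inner loop has reached column t of row k =====
def entryF (M N : Nat) (pts : List (List Int)) (k t i j : Nat) : Option Int :=
  if k < i ∨ (k = i ∧ t ≤ j) ∨ i = M then F M N pts i j
  else if i + 1 = M ∧ j = N then some 1 else none

def dpOf (M N : Nat) (pts : List (List Int)) (k t : Nat) : List (List (Option Int)) :=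
  (List.range (M+1)).map (fun i => (List.range (N+1)).map (fun j => entryF M N pts k t i j))

lemma set_map_range {α : Type} {L : Nat} (f : Nat → α) {i : Nat} (hi : i < L) (v : α) :
    ((List.range L).map f).set i v = (List.range L).map (fun x => if x = i then v else f x) := by
  apply List.ext_getElem
  · simp
  · intro k h1 h2
    simp only [List.getElem_set, List.getElem_map, List.getElem_range]
    simp only [List.length_set, List.length_map, List.length_range] at h1
    by_cases hk : k = i
    · subst hk; simp
    · simp [hk, Ne.symm hk]

lemma cellGet_map_range {f : Nat → Nat → Option Int} {M N i j : Nat} (hi : i < M+1) (hj : j < N+1) :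
    cellGet ((List.range (M+1)).map (fun i => (List.range (N+1)).map (f i))) (i : Int) (j : Int)
      = f i j := by
  rw [cellGet, PySem.List.pyGetD_natCast, PySem.List.pyGetD_natCast,
      PySem.List.getD_map_range _ _ _ _ hi, PySem.List.getD_map_range _ _ _ _ hj]

lemma cellSet_map_range {f : Nat → Nat → Option Int} {M N i j : Nat} (hi : i < M+1) (hj : j < N+1)
    (v : Option Int) :
    cellSet ((List.range (M+1)).map (fun i => (List.range (N+1)).map (f i))) (i : Int) (j : Int) v
      = (List.range (M+1)).map (fun i' => (List.range (N+1)).map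
          (fun j' => if i' = i ∧ j' = j then v else f i' j')) := by
  rw [cellSet, PySem.List.pyGetD_natCast, PySem.List.pySetD_natCast, PySem.List.pySetD_natCast,
      PySem.List.getD_map_range _ _ _ _ hi, set_map_range _ hj, set_map_range _ hi]
  apply List.map_congr_left
  intro i' hi'
  by_cases h : i' = i
  · subst h
    rw [if_pos rfl]
    apply List.map_congr_left
    intro j' _
    by_cases hj' : j' = j
    · simp [hj']
    · simp [hj']
  · simp only [if_neg h]
    apply List.map_congr_left
    intro j' _
    simp [h]

lemma cellGet_dpOf {M N : Nat} {pts : List (List Int)} {k t i j : Nat} (hi : i < M+1) (hj : j < N+1) :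
    cellGet (dpOf M N pts k t) (i : Int) (j : Int) = entryF M N pts k t i j := by
  rw [dpOf]; exact cellGet_map_range hi hj

lemma stepA {M N : Nat} {pts : List (List Int)} {r t : Nat} (hr : r < M) (ht : t < N) :
    cellSet (dpOf M N pts r (t+1)) (r : Int) (t : Int) (F M N pts r t) = dpOf M N pts r t := by
  rw [dpOf, cellSet_map_range (by omega) (by omega), dpOf]
  apply List.map_congr_left
  intro i hi
  rw [List.mem_range] at hi
  apply List.map_congr_left
  intro j hj
  rw [List.mem_range] at hj
  by_cases h : i = r ∧ j = t
  · obtain ⟨h1, h2⟩ := h; subst h1; subst h2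
    rw [if_pos ⟨rfl, rfl⟩, entryF, if_pos (by omega)]
  · rw [if_neg h, entryF, entryF]
    split_ifs with h1 h2 <;> first | rfl | omega

lemma innerStepA {M N : Nat} {pts : List (List Int)} {r t : Nat} (hr : r < M) (ht : t < N) :
    cellSet (dpOf M N pts r (t+1)) (r : Int) (t : Int)
      (oMax1 (oSub (oMin (cellGet (dpOf M N pts r (t+1)) ((r : Int)+1) (t : Int))
                         (cellGet (dpOf M N pts r (t+1)) (r : Int) ((t : Int)+1)))
        (PySem.List.pyGetD (PySem.List.pyGetD pts (r : Int) []) (t : Int) 0)))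
      = dpOf M N pts r t := by
  have c1 : ((r : Int) + 1) = ((r + 1 : Nat) : Int) := by push_cast; ring
  have c2 : ((t : Int) + 1) = ((t + 1 : Nat) : Int) := by push_cast; ring
  have g1 : cellGet (dpOf M N pts r (t+1)) ((r : Int)+1) (t : Int) = F M N pts (r+1) t := by
    rw [c1, cellGet_dpOf (by omega) (by omega), entryF, if_pos (by omega)]
  have g2 : cellGet (dpOf M N pts r (t+1)) (r : Int) ((t : Int)+1) = F M N pts r (t+1) := by
    rw [c2, cellGet_dpOf (by omega) (by omega), entryF, if_pos (by omega)]
  have g3 : PySem.List.pyGetD (PySem.List.pyGetD pts (r : Int) []) (t : Int) 0 = pget pts r t := by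
    rw [PySem.List.pyGetD_natCast, PySem.List.pyGetD_natCast]; rfl
  rw [g1, g2, g3, ← F_int hr ht]
  exact stepA hr ht

lemma innerA {M N : Nat} {pts : List (List Int)} {r : Nat} (hr : r < M) :
    ∀ t, t ≤ N →
      (PySem.List.pyRange ((t : Int) - 1) (-1) (-1)).foldl
        (fun dp j => cellSet dp (r : Int) j
          (oMax1 (oSub (oMin (cellGet dp ((r : Int)+1) j) (cellGet dp (r : Int) (j+1)))
            (PySem.List.pyGetD (PySem.List.pyGetD pts (r : Int) []) j 0)))) (dpOf M N pts r t)
      = dpOf M N pts r 0 := by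
  intro t
  induction t with
  | zero =>
    intro _
    rw [show ((0 : Nat) : Int) - 1 = -1 by norm_num, PySem.List.pyRange_neg_one_eq_nil le_rfl]
    rfl
  | succ t ih =>
    intro ht
    rw [show (((t+1 : Nat) : Int)) - 1 = (t : Int) by push_cast; ring,
        PySem.List.pyRange_neg_one_cons (by omega : (-1 : Int) < (t : Int)), List.foldl_cons]
    have : cellSet (dpOf M N pts r (t+1)) (r : Int) (t : Int)
      (oMax1 (oSub (oMin (cellGet (dpOf M N pts r (t+1)) ((r : Int)+1) (t : Int))
                         (cellGet (dpOf M N pts r (t+1)) (r : Int) ((t : Int)+1)))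
        (PySem.List.pyGetD (PySem.List.pyGetD pts (r : Int) []) (t : Int) 0)))
        = dpOf M N pts r t := innerStepA hr (by omega)
    rw [this]
    exact ih (by omega)

lemma dpOf_shift {M N : Nat} {pts : List (List Int)} {r : Nat} (hr : r < M) :
    dpOf M N pts (r+1) 0 = dpOf M N pts r N := by
  rw [dpOf, dpOf]
  apply List.map_congr_left
  intro i hi
  rw [List.mem_range] at hi
  apply List.map_congr_left
  intro j hj
  rw [List.mem_range] at hj
  simp only [entryF]
  split_ifs <;>
    first
      | rfl
      | omega
      | (rw [F_bnd (by omega)]; split_ifs <;> first | rfl | omega)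

lemma initA {M N : Nat} {pts : List (List Int)} (hM : 1 ≤ M) (hN : 1 ≤ N) :
    cellSet (cellSet ((List.range (M+1)).map
        (fun _ => (List.range (N+1)).map (fun _ => (none : Option Int))))
        ((M-1 : Nat) : Int) (N : Int) (some 1)) (M : Int) ((N-1 : Nat) : Int) (some 1)
      = dpOf M N pts (M-1) N := by
  rw [cellSet_map_range (f := fun _ _ => (none : Option Int)) (by omega) (by omega),
      cellSet_map_range (by omega) (by omega), dpOf]
  apply List.map_congr_left
  intro i hi
  rw [List.mem_range] at hi
  apply List.map_congr_left
  intro j hj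
  rw [List.mem_range] at hj
  simp only [entryF]
  split_ifs <;>
    first
      | rfl
      | omega
      | (rw [F_bnd (by omega)]; split_ifs <;> first | rfl | omega)

lemma outerA {M N : Nat} {pts : List (List Int)} (hN : 1 ≤ N) :
    ∀ r, r < M →
      (PySem.List.pyRange (r : Int) (-1) (-1)).foldl (fun dp i =>
        (PySem.List.pyRange (((N-1 : Nat)) : Int) (-1) (-1)).foldl (fun dp j =>
          cellSet dp i j (oMax1 (oSub (oMin (cellGet dp (i+1) j) (cellGet dp i (j+1)))
            (PySem.List.pyGetD (PySem.List.pyGetD pts i []) j 0)))) dp) (dpOf M N pts r N)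
      = dpOf M N pts 0 0 := by
  intro r
  induction r with
  | zero =>
    intro hr
    rw [PySem.List.pyRange_neg_one_cons (by norm_num : (-1 : Int) < ((0 : Nat) : Int)),
        show ((0 : Nat) : Int) - 1 = -1 by norm_num, PySem.List.pyRange_neg_one_eq_nil le_rfl,
        List.foldl_cons, List.foldl_nil,
        show (((N-1 : Nat)) : Int) = (N : Int) - 1 by omega]
    exact innerA hr N le_rfl
  | succ r ih =>
    intro hr
    rw [PySem.List.pyRange_neg_one_cons (by omega : (-1 : Int) < ((r+1 : Nat) : Int)), List.foldl_cons,
        show (((r+1 : Nat) : Int)) - 1 = (r : Int) by push_cast; ring]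
    have h1 : (PySem.List.pyRange (((N-1 : Nat)) : Int) (-1) (-1)).foldl (fun dp j =>
          cellSet dp ((r+1 : Nat) : Int) j
            (oMax1 (oSub (oMin (cellGet dp (((r+1 : Nat) : Int)+1) j) (cellGet dp ((r+1 : Nat) : Int) (j+1)))
              (PySem.List.pyGetD (PySem.List.pyGetD pts ((r+1 : Nat) : Int) []) j 0)))) (dpOf M N pts (r+1) N)
        = dpOf M N pts (r+1) 0 := by
      rw [show (((N-1 : Nat)) : Int) = (N : Int) - 1 by omega]
      exact innerA hr N le_rfl
    rw [h1, dpOf_shift (by omega)]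
    exact ih (by omega)

-- ===== B side: the recursion needB computes F at in-range Nat indices =====
lemma needB_eq_F {M N : Nat} {pts : List (List Int)} (hM : 1 ≤ M) (hN : 1 ≤ N) :
    ∀ i j : Nat, i ≤ M → j ≤ N →
      needB (M : Int) (N : Int) pts (i : Int) (j : Int) = F M N pts i j := by
  suffices h : ∀ d i j : Nat, (M - i) + (N - j) ≤ d → i ≤ M → j ≤ N →
      needB (M : Int) (N : Int) pts (i : Int) (j : Int) = F M N pts i j by
    intro i j hi hj; exact h ((M - i) + (N - j)) i j le_rfl hi hj
  intro d
  induction d with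
  | zero =>
    intro i j hd hi hj
    have hiM : i = M := by omega
    have hjN : j = N := by omega
    subst hiM; subst hjN
    rw [needB, if_neg (by omega), if_neg (by omega), if_pos (by omega), F_bnd (by omega),
        if_neg (by omega)]
  | succ d ih =>
  intro i j hd hi hj
  rw [needB]
  by_cases h1 : (j : Int) = (N : Int) ∧ (i : Int) = (M : Int) - 1
  · rw [if_pos h1, F_bnd (by omega), if_pos (Or.inl (by omega))]
  · rw [if_neg h1]
    by_cases h2 : (i : Int) = (M : Int) ∧ (j : Int) = (N : Int) - 1
    · rw [if_pos h2, F_bnd (by omega), if_pos (Or.inr (by omega))]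
    · rw [if_neg h2]
      by_cases h3 : (i : Int) ≥ (M : Int) ∨ (j : Int) ≥ (N : Int)
      · rw [if_pos h3, F_bnd (by omega)]
        rw [if_neg (by omega)]
      · rw [if_neg h3]
        have hiM : i < M := by omega
        have hjN : j < N := by omega
        have e1 : (i : Int) + 1 = ((i+1 : Nat) : Int) := by push_cast; ring
        have e2 : (j : Int) + 1 = ((j+1 : Nat) : Int) := by push_cast; ring
        have r1 : needB (M : Int) (N : Int) pts ((i : Int)+1) (j : Int) = F M N pts (i+1) j := by
          rw [e1]; exact ih (i+1) j (by omega) (by omega) hj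
        have r2 : needB (M : Int) (N : Int) pts (i : Int) ((j : Int)+1) = F M N pts i (j+1) := by
          rw [e2]; exact ih i (j+1) (by omega) hi (by omega)
        rw [r1, r2, F_int hiM hjN]
        have g3 : PySem.List.pyGetD (PySem.List.pyGetD pts (i : Int) []) (j : Int) 0 = pget pts i j := by
          rw [PySem.List.pyGetD_natCast, PySem.List.pyGetD_natCast]; rfl
        rw [g3]
        cases F M N pts (i+1) j with
        | none =>
          cases F M N pts i (j+1) with
          | none => rfl
          | some b =>
            show some (if b - pget pts i j > 1 then b - pget pts i j else 1)
              = some (max 1 (b - pget pts i j))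
            congr 1; split_ifs <;> omega
        | some a =>
          cases F M N pts i (j+1) with
          | none =>
            show some (if a - pget pts i j > 1 then a - pget pts i j else 1)
              = some (max 1 (a - pget pts i j))
            congr 1; split_ifs <;> omega
          | some b =>
            show some (if min a b - pget pts i j > 1 then min a b - pget pts i j else 1)
              = some (max 1 (min a b - pget pts i j))
            congr 1; split_ifs <;> omega

-- ===== VERDICT (by name: the statement is the Claim_ definition above) =====
theorem minPoints_spec : Claim_equal_minPoints := by
  intro m n pts _ hpre
  unfold Spec_minPoints
  rcases hpre with ⟨hm, hn, -, -⟩ | ⟨hm0, hn1⟩ | ⟨hm1, hn0⟩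
  case inr.inl =>
    subst hm0; subst hn1
    rw [minPoints_alt, needB]
    norm_num
    rfl
  case inr.inr =>
    subst hm1; subst hn0
    rw [minPoints_alt, needB]
    norm_num
    rfl
  set M := m.toNat with hMdef
  set N := n.toNat with hNdef
  have hmM : (M : Int) = m := Int.toNat_of_nonneg (by omega)
  have hnN : (N : Int) = n := Int.toNat_of_nonneg (by omega)
  have hM1 : 1 ≤ M := by omega
  have hN1 : 1 ≤ N := by omega
  have hA : minPoints m n pts = fv M N pts 0 0 := by
    unfold minPoints
    rw [show (PySem.List.pyRange 0 (m+1) 1).map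
          (fun _ => (PySem.List.pyRange 0 (n+1) 1).map (fun _ => (none : Option Int)))
        = (List.range (M+1)).map (fun _ => (List.range (N+1)).map (fun _ => (none : Option Int)))
      from by
        rw [PySem.List.pyRange_one, PySem.List.pyRange_one,
            show ((m+1) - 0).toNat = M + 1 by omega, show ((n+1) - 0).toNat = N + 1 by omega,
            List.map_map, List.map_map]
        rfl]
    rw [show m - 1 = ((M-1 : Nat) : Int) by omega,
        show n - 1 = ((N-1 : Nat) : Int) by omega, ← hmM, ← hnN]
    dsimp only
    rw [initA (pts := pts) hM1 hN1]
    rw [outerA hN1 (M-1) (by omega)]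
    rw [show (0 : Int) = ((0 : Nat) : Int) by norm_num]
    rw [cellGet_dpOf (by omega) (by omega), entryF, if_pos (by omega),
        F_some M N pts 0 0 (by omega) (by omega)]
    rfl
  have hB : minPoints_alt m n pts = fv M N pts 0 0 := by
    rw [minPoints_alt, ← hmM, ← hnN,
        show (0 : Int) = ((0 : Nat) : Int) by norm_num,
        needB_eq_F hM1 hN1 0 0 (by omega) (by omega),
        F_some M N pts 0 0 (by omega) (by omega)]
    rfl
  rw [hA, hB]
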